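-- pv_equiv track=rewrite | github.com/WaivedAnswer/AdventOfCode | 2015/Day_11/Program.py | incrementedWordAtIndex
-- ===== SOURCE A (Python) =====
-- def incrementChar(char):
-- 	if(char == "z" or char == "Z"):
-- 		return "a"
-- 	return chr(ord(char) + 1)
--
-- def incrementedWordAtIndex(word,index):
-- 	if(word[index] == "z" or word[index] == "Z" ):
-- 		if(index == 0 or len(word) == 1 ):
-- 			return "a" * (len(word) + 1)
-- 		else:
-- 			return incrementedWordAtIndex(word, index - 1)
-- 	newWord = word[:index] + incrementChar(word[index])
-- 	if(index > 0):
-- 		newWord = newWord + "a" * len(word[index+1:])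
-- 	else:
-- 		newWord = newWord + "a" * len(word[len(word)+index+1:])
-- 	return newWord
-- ===== SOURCE B (Python) =====
-- def incrementedWordAtIndex(word, index):
--     p = index if index >= 0 else len(word) + index
--     stripped = word[:p + 1].rstrip("zZ")
--     if not stripped:
--         return "a" * (len(word) + 1)
--     return stripped[:-1] + chr(ord(stripped[-1]) + 1) + "a" * (len(word) - len(stripped))
-- ===== Notes on version B (the rewrite author's own statement) =====
-- stated objective: simpler
-- what changed: Replaces A's per-character recursion with a single rstrip('zZ') of the prefix up to the (normalized) index, then one bump-and-pad expression; B is shorter, loop-free and needs no helper.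
-- intended difference: On in-range non-negative indices whose carry chain ends at position 0 on a non-'z'/'Z' first character of a word of length >= 2 (e.g. ('bc', 0)), A's odd slice word[len(word)+index+1:] drops the whole tail and returns just the incremented first character ('c'), while B keeps the word's length and returns the incremented character followed by 'a's ('ca'), which is the intended password-increment behaviour (A itself does this correctly for the equivalent negative index -len(word)). — e.g. on incrementedWordAtIndex("bc", 0): A returns "c", B returns "ca"
import Mathlib
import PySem

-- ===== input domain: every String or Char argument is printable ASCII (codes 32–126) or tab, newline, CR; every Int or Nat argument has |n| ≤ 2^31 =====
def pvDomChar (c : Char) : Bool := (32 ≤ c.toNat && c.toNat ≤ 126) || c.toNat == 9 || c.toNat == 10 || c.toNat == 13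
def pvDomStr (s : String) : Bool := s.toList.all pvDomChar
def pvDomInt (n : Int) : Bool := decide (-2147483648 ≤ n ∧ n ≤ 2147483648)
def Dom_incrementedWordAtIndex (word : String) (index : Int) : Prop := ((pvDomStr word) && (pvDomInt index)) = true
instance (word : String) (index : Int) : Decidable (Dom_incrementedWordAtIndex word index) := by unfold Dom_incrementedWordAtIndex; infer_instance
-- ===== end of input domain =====

-- B replaces A's per-character recursion by one rstrip("zZ") of the prefix up to the index plus a
-- single bump-and-pad expression; on the index-0 carry-free corner (D_ below) A drops the tail and
-- B keeps the word's length, which is the intended password-increment behaviour.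


-- ===== PORT A =====
-- incrementChar, literal
def pvIncChar (c : Char) : Char :=
  if c = 'z' ∨ c = 'Z' then 'a' else Char.ofNat (c.toNat + 1)

-- Literal recursion of A over the char list.  The fuel argument only guarantees termination (each
-- recursive call moves the accessed position one to the left, so the initial fuel below is never
-- exhausted); it does not change the value reached.  Where Python raises IndexError
-- (word[index] out of range) PySem.List.pyGet? is none and we return [] — those inputs are
-- excluded by Pre_.  "a" * k is List.replicate k 'a'.
def pvAgo (w : List Char) : Int → Nat → List Char
  | _, 0 => []
  | index, fuel+1 =>
    match PySem.List.pyGet? w index with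
    | none => []
    | some c =>
      if c = 'z' ∨ c = 'Z' then
        if index = 0 ∨ (w.length : Int) = 1 then
          List.replicate (w.length + 1) 'a'
        else
          pvAgo w (index - 1) fuel
      else
        let newWord := PySem.List.slice w none (some index) ++ [pvIncChar c]
        if index > 0 then
          newWord ++ List.replicate (PySem.List.slice w (some (index + 1)) none).length 'a'
        else
          newWord ++ List.replicate (PySem.List.slice w (some ((w.length : Int) + index + 1)) none).length 'a'

def incrementedWordAtIndex (word : String) (index : Int) : String :=
  String.ofList (pvAgo word.toList index (index.natAbs + word.toList.length + 1))

-- ===== PORT B =====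
-- literal port of Source B.  s.rstrip("zZ") has no PySem primitive, so it is ported by hand, exactly:
-- drop the maximal run of 'z'/'Z' characters from the right end (reverse, dropWhile, reverse).
def pvRstripZ (s : List Char) : List Char :=
  (s.reverse.dropWhile (fun c => decide (c = 'z' ∨ c = 'Z'))).reverse

def pvAltGo (w : List Char) (index : Int) : List Char :=
  let p : Int := if index ≥ 0 then index else (w.length : Int) + index
  let stripped := pvRstripZ (PySem.List.slice w none (some (p + 1)))
  if h : stripped = [] then
    List.replicate (w.length + 1) 'a'
  else
    stripped.dropLast ++ [Char.ofNat ((stripped.getLast h).toNat + 1)]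
      ++ List.replicate (w.length - stripped.length) 'a'

def incrementedWordAtIndex_alt (word : String) (index : Int) : String :=
  String.ofList (pvAltGo word.toList index)

-- ===== PRECONDITION & SPEC =====
-- Pre_ excludes exactly the inputs on which the Python A raises IndexError: an index outside
-- [-len(word), len(word)), and a negative index on a word of length ≥ 2 all of whose characters
-- from position 0 up to the indexed one are 'z'/'Z' (A's recursion then runs off the left end).
def Pre_incrementedWordAtIndex (word : String) (index : Int) : Prop :=
  -(word.toList.length : Int) ≤ index ∧ index < (word.toList.length : Int) ∧
  (index < 0 → 2 ≤ word.toList.length →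
    ¬ (word.toList.take (word.toList.length + index + 1).toNat).all
        (fun c => decide (c = 'z' ∨ c = 'Z')) = true)
instance (word : String) (index : Int) : Decidable (Pre_incrementedWordAtIndex word index) := by
  unfold Pre_incrementedWordAtIndex; infer_instance

def pvWitness_incrementedWordAtIndex : String × Int := ("abc", 1)

-- On in-range non-negative indices whose carry chain ends at position 0 on a non-'z'/'Z' first
-- character of a word of length ≥ 2, A's slice word[len(word)+index+1:] drops the whole tail and
-- returns only the incremented first character, while B pads with 'a's and keeps the word's
-- length — the intended password-increment behaviour (A itself keeps the tail for the equivalent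
-- negative index).
def D_incrementedWordAtIndex (word : String) (index : Int) : Prop :=
  let w := word.toList
  0 ≤ index ∧ index.toNat < w.length ∧ 2 ≤ w.length ∧
  ['z', 'Z'].contains (w.headD 'a') = false ∧
  ((w.take (index.toNat + 1)).drop 1).all ['z', 'Z'].contains = true
instance (word : String) (index : Int) : Decidable (D_incrementedWordAtIndex word index) := by
  unfold D_incrementedWordAtIndex; infer_instance

def Spec_incrementedWordAtIndex (word : String) (index : Int) (out : String) : Prop :=
  ¬ D_incrementedWordAtIndex word index → out = incrementedWordAtIndex_alt word index
instance (word : String) (index : Int) (out : String) : Decidable (Spec_incrementedWordAtIndex word index out) := by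
  unfold Spec_incrementedWordAtIndex; infer_instance

def pvDiffWitness_incrementedWordAtIndex : String × Int := ("bc", 0)
def pvDiffWitnessOut_incrementedWordAtIndex : String × String := ("c", "ca")

-- ===== CLAIM (what is proved, stated in full; the proofs are below) =====
def Claim_unchanged_incrementedWordAtIndex : Prop := ∀ (word : String) (index : Int), Dom_incrementedWordAtIndex word index → Pre_incrementedWordAtIndex word index → Spec_incrementedWordAtIndex word index (incrementedWordAtIndex word index)
def Claim_changed_incrementedWordAtIndex : Prop := Dom_incrementedWordAtIndex (pvDiffWitness_incrementedWordAtIndex.1) (pvDiffWitness_incrementedWordAtIndex.2) ∧ Pre_incrementedWordAtIndex (pvDiffWitness_incrementedWordAtIndex.1) (pvDiffWitness_incrementedWordAtIndex.2) ∧ D_incrementedWordAtIndex (pvDiffWitness_incrementedWordAtIndex.1) (pvDiffWitness_incrementedWordAtIndex.2) ∧ incrementedWordAtIndex (pvDiffWitness_incrementedWordAtIndex.1) (pvDiffWitness_incrementedWordAtIndex.2) = pvDiffWitnessOut_incrementedWordAtIndex.1 ∧ incrementedWordAtIndex_alt (pvDiffWitness_incrementedWordAtIndex.1) (pvDiffWitness_incrementedWordAtIndex.2)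 = pvDiffWitnessOut_incrementedWordAtIndex.2 ∧ pvDiffWitnessOut_incrementedWordAtIndex.1 ≠ pvDiffWitnessOut_incrementedWordAtIndex.2
def Claim_exact_incrementedWordAtIndex : Prop := ∀ (word : String) (index : Int), Dom_incrementedWordAtIndex word index → Pre_incrementedWordAtIndex word index → D_incrementedWordAtIndex word index → incrementedWordAtIndex word index ≠ incrementedWordAtIndex_alt word index

-- ===== LEMMAS AND PROOFS =====

-- B restated over the 0-based position actually accessed
def pvAltCore (w : List Char) (q : Nat) : List Char :=
  let stripped := pvRstripZ (w.take (q+1))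
  if h : stripped = [] then
    List.replicate (w.length + 1) 'a'
  else
    stripped.dropLast ++ [Char.ofNat ((stripped.getLast h).toNat + 1)]
      ++ List.replicate (w.length - stripped.length) 'a'

lemma take_concat (w : List Char) (q : Nat) (hqn : q < w.length) :
    w.take (q+1) = w.take q ++ [w[q]] := by
  rw [List.take_add_one, List.getElem?_eq_getElem hqn]; rfl

lemma rstrip_concat_z (s : List Char) (c : Char) (hc : c = 'z' ∨ c = 'Z') :
    pvRstripZ (s ++ [c]) = pvRstripZ s := by
  simp [pvRstripZ, hc]

lemma rstrip_concat_nz (s : List Char) (c : Char) (hc : ¬ (c = 'z' ∨ c = 'Z')) :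
    pvRstripZ (s ++ [c]) = s ++ [c] := by
  simp [pvRstripZ, hc]

lemma rstrip_cons_allz (x : Char) (s : List Char) (hx : ¬ (x = 'z' ∨ x = 'Z'))
    (hs : ∀ c ∈ s, (c = 'z' ∨ c = 'Z')) : pvRstripZ (x :: s) = [x] := by
  unfold pvRstripZ
  rw [show (x :: s).reverse = s.reverse ++ [x] by simp, List.dropWhile_append]
  rw [if_pos (by simp [List.dropWhile_eq_nil_iff]; intro c hc; simpa using hs c (by simpa using hc))]
  simp [List.dropWhile_cons, hx]

lemma altGo_eq_core (w : List Char) (i : Int) (q : Nat) (h1 : -(w.length : Int) ≤ i)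
    (h2 : i < (w.length : Int)) (hq : (if 0 ≤ i then i.toNat else (w.length + i).toNat) = q) :
    pvAltGo w i = pvAltCore w q := by
  have hp : (if i ≥ 0 then i else (w.length : Int) + i) + 1 = ((q + 1 : Nat) : Int) := by
    split_ifs <;> split_ifs at hq <;> push_cast <;> omega
  simp only [pvAltGo, pvAltCore]
  rw [hp]
  rw [show PySem.List.slice w none (some ((q+1 : Nat) : Int)) = w.take (q+1) by
    simpa using PySem.List.slice_to_natCast w (q+1)]

lemma core_z_step (w : List Char) (q : Nat) (hqn : q < w.length)
    (hz : w[q] = 'z' ∨ w[q] = 'Z') (hq1 : 1 ≤ q) :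
    pvAltCore w q = pvAltCore w (q-1) := by
  simp only [pvAltCore]
  rw [take_concat w q hqn, rstrip_concat_z _ _ hz, show q - 1 + 1 = q by omega]

lemma core_nz (w : List Char) (q : Nat) (hqn : q < w.length)
    (hz : ¬ (w[q] = 'z' ∨ w[q] = 'Z')) :
    pvAltCore w q = w.take q ++ [Char.ofNat (w[q].toNat + 1)]
      ++ List.replicate (w.length - (q+1)) 'a' := by
  simp only [pvAltCore]
  rw [take_concat w q hqn, rstrip_concat_nz _ _ hz]
  rw [dif_neg (by intro h; have h2 := congrArg List.length h; simp at h2; subst h2; simp at hqn)]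
  rw [List.dropLast_concat, List.getLast_concat]
  have hmin : min (q+1) w.length = q + 1 := by omega
  simp [hmin]

-- A = B on Pre_ outside D_, at the 0-based position q, with enough fuel
lemma ago_eq_alt (w : List Char) : ∀ (fuel : Nat) (i : Int),
    -(w.length : Int) ≤ i → i < (w.length : Int) →
    (i < 0 → 2 ≤ w.length → ¬ ∀ c ∈ w.take (w.length + i + 1).toNat, (c = 'z' ∨ c = 'Z')) →
    ¬ (0 ≤ i ∧ i < (w.length : Int) ∧ 2 ≤ w.length ∧
        ¬ (w.headD 'a' = 'z' ∨ w.headD 'a' = 'Z') ∧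
        ∀ c ∈ (w.take (i.toNat + 1)).drop 1, (c = 'z' ∨ c = 'Z')) →
    (if 0 ≤ i then i.toNat else (w.length + i).toNat) < fuel →
    pvAgo w i fuel = pvAltGo w i := by
  intro fuel
  induction fuel with
  | zero => intro i _ _ _ _ hf; split at hf <;> omega
  | succ fuel ih =>
    intro i h1 h2 hpre hD hf
    obtain ⟨q, hq⟩ : ∃ q : Nat, (if 0 ≤ i then i.toNat else (w.length + i).toNat) = q := ⟨_, rfl⟩
    have hqn : q < w.length := by split at hq <;> omega
    rw [hq] at hf
    have hidx : PySem.List.pyIdx? w.length i = some q := by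
      simp only [PySem.List.pyIdx?]
      split_ifs <;> simp_all <;> omega
    have hget : PySem.List.pyGet? w i = some w[q] := by
      simp only [PySem.List.pyGet?, hidx, Option.bind_some]
      exact List.getElem?_eq_getElem hqn
    rw [altGo_eq_core w i q h1 h2 hq]
    simp only [pvAgo, hget]
    by_cases hz : w[q] = 'z' ∨ w[q] = 'Z'
    · rw [if_pos hz]
      by_cases hstop : i = 0 ∨ (w.length : Int) = 1
      · -- grow case: q = 0 and w[0] is 'z'/'Z': both return "a" * (len + 1)
        rw [if_pos hstop]
        have hq0 : q = 0 := by rcases hstop with h | h <;> split at hq <;> omega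
        unfold pvAltCore
        rw [dif_pos]
        rw [hq0, show (0:Nat)+1 = 1 from rfl]
        rw [show w.take 1 = w.take 0 ++ [w[0]] from take_concat w 0 (by omega), show w.take 0 = [] from rfl]
        rw [List.nil_append]
        exact rstrip_concat_z [] _ (hq0 ▸ hz) |>.trans rfl
      · rw [if_neg hstop]
        push_neg at hstop
        have hn2 : 2 ≤ w.length := by omega
        have hq1 : 1 ≤ q := by
          rcases lt_trichotomy i 0 with hi | hi | hi
          · by_contra h
            have hq0 : q = 0 := by omega
            apply hpre hi hn2
            intro c hc
            have : (w.length + i + 1).toNat = 1 := by split at hq <;> omega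
            rw [this] at hc
            rw [show w.take 1 = w.take 0 ++ [w[0]] from take_concat w 0 (by omega)] at hc
            simp at hc
            subst hc
            have : w[0] = w[q] := by subst hq0; rfl
            rw [this]; exact hz
          · omega
          · split at hq <;> omega
        rw [core_z_step w q hqn hz hq1, ← altGo_eq_core w (i-1) (q-1) (by split at hq <;> omega)
          (by omega) (by split at hq <;> split <;> omega)]
        apply ih (i-1) (by split at hq <;> omega) (by omega)
        · -- Pre_ carries down to index i-1
          intro hi1 hnn hall
          have hi0 : i < 0 := by omega
          apply hpre hi0 hnn
          intro c hc
          have he : (w.length + i + 1).toNat = q + 1 := by split at hq <;> omega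
          have he2 : (w.length + (i-1) + 1).toNat = q := by split at hq <;> omega
          rw [he] at hc
          rw [take_concat w q hqn] at hc
          rcases List.mem_append.1 hc with h | h
          · exact hall c (by rw [he2]; exact h)
          · simp at h; subst h; exact hz
        · -- ¬ D_ carries down to index i-1
          rintro ⟨hd1, hd2, hd3, hd4, hd5⟩
          apply hD
          refine ⟨by omega, h2, hd3, hd4, ?_⟩
          have hiq : i.toNat = q := by split at hq <;> omega
          have hiq1 : (i-1).toNat = q - 1 := by omega
          rw [hiq1, show q - 1 + 1 = q from by omega] at hd5
          rw [hiq, take_concat w q hqn,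
            List.drop_append_of_le_length (by simp; omega)]
          intro c hc
          rcases List.mem_append.1 hc with h | h
          · exact hd5 c h
          · simp at h; subst h; exact hz
        · split <;> split at hq <;> omega
    · rw [if_neg hz, core_nz w q hqn hz]
      have hinc : pvIncChar w[q] = Char.ofNat (w[q].toNat + 1) := by
        unfold pvIncChar; rw [if_neg hz]
      rcases lt_trichotomy i 0 with hi | hi | hi
      · -- negative index
        rw [if_neg (by omega)]
        have hqe : (w.length + i).toNat = q := by split at hq <;> omega
        have hs1 : PySem.List.slice w none (some i) = w.take q := by
          rw [show i = -(((-i).toNat : Nat) : Int) by omega,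
            PySem.List.slice_to_neg_natCast w (-i).toNat (by omega)]
          congr 1; omega
        have hs2 : PySem.List.slice w (some ((w.length : Int) + i + 1)) none = w.drop (q+1) := by
          rw [show (w.length : Int) + i + 1 = ((q+1 : Nat) : Int) by push_cast; omega]
          simpa using PySem.List.slice_from_natCast w (q+1)
        rw [hs1, hs2, hinc]
        simp [List.length_drop]
      · -- i = 0: here ¬ D_ forces length 1, and both pads are empty
        subst hi
        have hq0 : q = 0 := by simpa using hq.symm
        have hn1 : w.length = 1 := by
          by_contra hne
          apply hD
          refine ⟨le_refl 0, h2, by omega, ?_, ?_⟩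
          · have : w.headD 'a' = w[0] := by
              rcases w with _ | ⟨a, t⟩
              · simp at hqn
              · rfl
            have h0 : w[0] = w[q] := by subst hq0; rfl
            rw [this, h0]
            exact hz
          · simp
        rw [if_neg (by omega)]
        have hs1 : PySem.List.slice w none (some 0) = w.take q := by
          rw [hq0]; simpa using PySem.List.slice_to_natCast w 0
        have hs2 : PySem.List.slice w (some ((w.length : Int) + 0 + 1)) none = w.drop (w.length+1) := by
          rw [show (w.length : Int) + 0 + 1 = ((w.length+1 : Nat) : Int) by push_cast; omega]
          simpa using PySem.List.slice_from_natCast w (w.length+1)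
        rw [hs1, hs2, hinc]
        simp [List.length_drop, hn1, hq0]
      · -- positive index
        rw [if_pos (by omega)]
        have hqe : i.toNat = q := by split at hq <;> omega
        have hs1 : PySem.List.slice w none (some i) = w.take q := by
          rw [show i = ((q : Nat) : Int) by omega]
          simpa using PySem.List.slice_to_natCast w q
        have hs2 : PySem.List.slice w (some (i + 1)) none = w.drop (q+1) := by
          rw [show i + 1 = ((q+1 : Nat) : Int) by push_cast; omega]
          simpa using PySem.List.slice_from_natCast w (q+1)
        rw [hs1, hs2, hinc]
        simp [List.length_drop]

-- inside D_, A returns exactly the one incremented first character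
lemma ago_D (w : List Char) : ∀ (fuel : Nat) (i : Int),
    0 ≤ i → i < (w.length : Int) →
    ¬ (w.headD 'a' = 'z' ∨ w.headD 'a' = 'Z') →
    (∀ c ∈ (w.take (i.toNat + 1)).drop 1, (c = 'z' ∨ c = 'Z')) →
    i.toNat < fuel →
    pvAgo w i fuel = [Char.ofNat ((w.headD 'a').toNat + 1)] := by
  intro fuel
  induction fuel with
  | zero => intro i _ _ _ _ hf; omega
  | succ fuel ih =>
    intro i h0 h2 hhead hall hf
    obtain ⟨q, hq⟩ : ∃ q : Nat, i.toNat = q := ⟨_, rfl⟩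
    have hqn : q < w.length := by omega
    have hhd : w.headD 'a' = w[0] := by
      rcases w with _ | ⟨a, t⟩
      · simp at hqn
      · rfl
    have hidx : PySem.List.pyIdx? w.length i = some q := by
      simp only [PySem.List.pyIdx?]
      split_ifs <;> simp_all <;> omega
    have hget : PySem.List.pyGet? w i = some w[q] := by
      simp only [PySem.List.pyGet?, hidx, Option.bind_some]
      exact List.getElem?_eq_getElem hqn
    simp only [pvAgo, hget]
    rcases Nat.eq_zero_or_pos q with hq0 | hq1
    · -- i = 0: the incremented head, and the empty tail slice
      have hz : ¬ (w[q] = 'z' ∨ w[q] = 'Z') := by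
        have h0q : w[0] = w[q] := by subst hq0; rfl
        rw [← h0q, ← hhd]; exact hhead
      rw [if_neg hz]
      have hi0 : i = 0 := by omega
      subst hi0
      rw [if_neg (by omega)]
      have hs1 : PySem.List.slice w none (some 0) = [] := by
        simpa using PySem.List.slice_to_natCast w 0
      have hs2 : PySem.List.slice w (some ((w.length : Int) + 0 + 1)) none = w.drop (w.length+1) := by
        rw [show (w.length : Int) + 0 + 1 = ((w.length+1 : Nat) : Int) by push_cast; omega]
        simpa using PySem.List.slice_from_natCast w (w.length+1)
      rw [hs1, hs2]
      have hinc : pvIncChar w[q] = Char.ofNat (w[q].toNat + 1) := by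
        unfold pvIncChar; rw [if_neg hz]
      rw [hinc]
      have h0q : w[0] = w[q] := by subst hq0; rfl
      rw [hhd, h0q]
      simp [List.length_drop]
    · -- i ≥ 1: this position is a 'z'/'Z', recurse to i-1
      have hmem : w[q] ∈ (w.take (i.toNat + 1)).drop 1 := by
        rw [hq, take_concat w q hqn, List.drop_append_of_le_length (by simp; omega)]
        exact List.mem_append.2 (Or.inr (by simp))
      have hz : w[q] = 'z' ∨ w[q] = 'Z' := hall _ hmem
      rw [if_pos hz, if_neg (by push_neg; constructor <;> omega)]
      rw [ih (i-1) (by omega) (by omega) hhead ?_ (by omega)]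
      intro c hc
      apply hall
      have hiq1 : (i-1).toNat = q - 1 := by omega
      rw [hiq1, show q - 1 + 1 = q from by omega] at hc
      rw [hq, take_concat w q hqn, List.drop_append_of_le_length (by simp; omega)]
      exact List.mem_append.2 (Or.inl hc)

-- inside D_, B returns the incremented first character followed by len-1 'a's
lemma alt_D (w : List Char) (i : Int) (h0 : 0 ≤ i) (h2 : i < (w.length : Int))
    (hhead : ¬ (w.headD 'a' = 'z' ∨ w.headD 'a' = 'Z'))
    (hall : ∀ c ∈ (w.take (i.toNat + 1)).drop 1, (c = 'z' ∨ c = 'Z')) :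
    pvAltGo w i = [Char.ofNat ((w.headD 'a').toNat + 1)] ++ List.replicate (w.length - 1) 'a' := by
  obtain ⟨q, hq⟩ : ∃ q : Nat, i.toNat = q := ⟨_, rfl⟩
  have hqn : q < w.length := by omega
  obtain ⟨x, t, hw⟩ : ∃ x t, w = x :: t := by
    rcases w with _ | ⟨x, t⟩
    · simp at hqn
    · exact ⟨x, t, rfl⟩
  rw [altGo_eq_core w i q (by omega) h2 (by rw [if_pos h0]; omega)]
  have htake : w.take (q+1) = x :: t.take q := by rw [hw]; rfl
  have hstr : pvRstripZ (w.take (q+1)) = [x] := by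
    rw [htake]
    apply rstrip_cons_allz x _ (by simpa [hw] using hhead)
    intro c hc
    apply hall
    rw [hq, show (w.take (q+1)).drop 1 = t.take q by rw [htake]; rfl]
    exact hc
  unfold pvAltCore
  rw [hstr]
  rw [dif_neg (by simp)]
  simp [hw]

-- Bool-valued conjuncts of Pre_/D_ restated as the ∀-form the lemmas above use
lemma Pre_iff (word : String) (index : Int) : Pre_incrementedWordAtIndex word index ↔
    (-(word.toList.length : Int) ≤ index ∧ index < (word.toList.length : Int) ∧
      (index < 0 → 2 ≤ word.toList.length →
        ¬ ∀ c ∈ word.toList.take (word.toList.length + index + 1).toNat, (c = 'z' ∨ c = 'Z'))) := by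
  unfold Pre_incrementedWordAtIndex
  simp [List.all_eq_true]

lemma D_iff (word : String) (index : Int) : D_incrementedWordAtIndex word index ↔
    (0 ≤ index ∧ index < (word.toList.length : Int) ∧ 2 ≤ word.toList.length ∧
      ¬ (word.toList.headD 'a' = 'z' ∨ word.toList.headD 'a' = 'Z') ∧
      ∀ c ∈ (word.toList.take (index.toNat + 1)).drop 1, (c = 'z' ∨ c = 'Z')) := by
  unfold D_incrementedWordAtIndex
  simp only [List.all_eq_true, List.contains_eq_mem, List.mem_cons, List.mem_singleton,
    decide_eq_true_eq, decide_eq_false_iff_not, List.not_mem_nil, or_false]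
  constructor
  · rintro ⟨a, b, c, d, e⟩
    exact ⟨a, by omega, c, d, e⟩
  · rintro ⟨a, b, c, d, e⟩
    exact ⟨a, by omega, c, d, e⟩

-- ===== VERDICT (by name: the statement is the Claim_ definition above) =====
theorem incrementedWordAtIndex_spec : Claim_unchanged_incrementedWordAtIndex := by
  intro word index hdom hpre hnD
  rw [Pre_iff] at hpre
  rw [D_iff] at hnD
  obtain ⟨h1, h2, h3⟩ := hpre
  unfold incrementedWordAtIndex incrementedWordAtIndex_alt
  congr 1
  apply ago_eq_alt word.toList _ index h1 h2 h3
  · intro hd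
    exact hnD hd
  · split <;> omega

set_option maxRecDepth 4096 in
theorem incrementedWordAtIndex_changed : Claim_changed_incrementedWordAtIndex := by
  unfold Claim_changed_incrementedWordAtIndex
  refine ⟨by decide, by decide, by decide, by decide, by decide, by decide⟩

theorem incrementedWordAtIndex_tight : Claim_exact_incrementedWordAtIndex := by
  intro word index hdom hpre hD heq
  rw [D_iff] at hD
  obtain ⟨h0, h2, hn2, hhead, hall⟩ := hD
  have := congrArg String.toList heq
  unfold incrementedWordAtIndex incrementedWordAtIndex_alt at this
  rw [String.toList_ofList, String.toList_ofList] at this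
  rw [ago_D word.toList _ index h0 h2 hhead hall (by omega)] at this
  rw [alt_D word.toList index h0 h2 hhead hall] at this
  have hlen := congrArg List.length this
  simp only [List.length_append, List.length_replicate, List.length_cons, List.length_nil] at hlen
  omega
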